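-- pv_equiv track=rewrite | github.com/mimvdb/duckietown_project | duckietown_project/map_gen.py | validate_cycle
-- ===== SOURCE A (Python) =====
-- from typing import List, Tuple
--
-- def neighs(x: int, y: int):
--     return [(x + 1, y), (x - 1, y), (x, y + 1), (x, y - 1)]
--
-- def validate_cycle(sequence: List[Tuple[int, int]]) -> bool:
--     tiles = set(sequence)
--     neighbours = {frozenset([sequence[i], sequence[(i + 1) % len(sequence)]]) for i in range(len(sequence))}
--     for x, y in sequence:
--         near = neighs(x, y)
--         for other in near:
--             if other in tiles and frozenset([other, (x,y)]) not in neighbours: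
--                 return False
--     return True
-- ===== SOURCE B (Python) =====
-- from typing import List, Tuple
--
-- def validate_cycle(sequence: List[Tuple[int, int]]) -> bool:
--     # Sort-then-scan: grid-adjacent tiles are consecutive in a lexicographic sort
--     # (vertical neighbours in the (x, y) sort, horizontal ones in the (y, x) sort),
--     # so it suffices to check consecutive sorted pairs against the cycle edges.
--     n = len(sequence)
--     edges = set()
--     for i in range(n):
--         edges.add(frozenset([sequence[i], sequence[(i + 1) % n]]))
--
--     def ok(ordered):
--         for p, q in zip(ordered, ordered[1:]):
--             if abs(p[0] - q[0]) + abs(p[1] - q[1]) == 1 and frozenset([p, q]) not in edges: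
--                 return False
--         return True
--
--     tiles = set(sequence)
--     return ok(sorted(tiles)) and ok(sorted(tiles, key=lambda t: (t[1], t[0])))
-- ===== Notes on version B (the rewrite author's own statement) =====
-- stated objective: alternative
-- what changed: Replaces A's probe of all four grid neighbours of every tile against a membership set by a sort-then-scan algorithm: the distinct tiles are sorted twice ((x,y)-lexicographic and (y,x)-lexicographic), and only CONSECUTIVE sorted pairs are tested, since vertically adjacent tiles are consecutive in the first sort and horizontally adjacent ones in the second; the per-tile neighbour enumeration and the tiles-membership test disappear.
import Mathlib
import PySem

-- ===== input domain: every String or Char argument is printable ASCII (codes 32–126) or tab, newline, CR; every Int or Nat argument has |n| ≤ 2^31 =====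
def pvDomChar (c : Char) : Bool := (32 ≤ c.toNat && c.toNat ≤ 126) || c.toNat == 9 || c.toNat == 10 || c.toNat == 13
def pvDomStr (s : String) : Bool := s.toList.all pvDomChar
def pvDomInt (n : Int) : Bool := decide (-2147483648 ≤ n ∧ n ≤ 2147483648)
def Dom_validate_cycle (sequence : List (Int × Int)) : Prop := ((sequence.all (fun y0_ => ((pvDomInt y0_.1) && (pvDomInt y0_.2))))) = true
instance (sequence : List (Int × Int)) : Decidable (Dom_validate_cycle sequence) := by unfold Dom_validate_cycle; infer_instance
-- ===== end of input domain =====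

-- B replaces A's four-neighbour probing of every tile by a sort-then-scan over the distinct
-- tiles (two lexicographic sorts, checking only consecutive pairs) — alternative algorithm.

-- ===== PORT A =====
def pvNeighs (x y : Int) : List (Int × Int) :=
  [(x + 1, y), (x - 1, y), (x, y + 1), (x, y - 1)]

-- frozenset([p, q]) of one or two tiles, represented EXACTLY by the lexicographically
-- sorted pair: two such frozensets are equal iff their canonical pairs are equal.
def pvFz (p q : Int × Int) : (Int × Int) × (Int × Int) :=
  if p.1 < q.1 ∨ (p.1 = q.1 ∧ p.2 ≤ q.2) then (p, q) else (q, p)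

-- the set comprehension {frozenset([sequence[i], sequence[(i+1)%len]]) for i in range(len)}
def pvNeighbours (sequence : List (Int × Int)) : PySem.Set ((Int × Int) × (Int × Int)) :=
  (PySem.List.pyRange 0 (sequence.length : Int) 1).foldl
    (fun s i =>
      PySem.Set.add s
        (pvFz (PySem.List.pyGetD sequence i (0, 0))
              (PySem.List.pyGetD sequence (PySem.Int.mod (i + 1) (sequence.length : Int)) (0, 0))))
    PySem.Set.empty

-- the for-loop of A with its early 'return False'
def pvLoopA (tiles : PySem.Set (Int × Int))
    (neighbours : PySem.Set ((Int × Int) × (Int × Int))) :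
    List (Int × Int) → Bool
  | [] => true
  | t :: rest =>
      let near := pvNeighs t.1 t.2
      if near.any (fun other =>
          PySem.Set.contains tiles other &&
          !(PySem.Set.contains neighbours (pvFz other t))) then
        false
      else
        pvLoopA tiles neighbours rest

def validate_cycle (sequence : List (Int × Int)) : Bool :=
  pvLoopA (PySem.Set.ofList sequence) (pvNeighbours sequence) sequence

-- ===== PORT B =====
-- B's for-loop building edges = { frozenset([sequence[i], sequence[(i+1)%n]]) }
def pvEdgesB (sequence : List (Int × Int)) : PySem.Set ((Int × Int) × (Int × Int)) :=
  (PySem.List.pyRange 0 (sequence.length : Int) 1).foldl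
    (fun s i =>
      PySem.Set.add s
        (pvFz (PySem.List.pyGetD sequence i (0, 0))
              (PySem.List.pyGetD sequence (PySem.Int.mod (i + 1) (sequence.length : Int)) (0, 0))))
    PySem.Set.empty

-- abs(p[0]-q[0]) + abs(p[1]-q[1]) == 1
def pvDist1 (p q : Int × Int) : Bool :=
  ((p.1 - q.1).natAbs + (p.2 - q.2).natAbs == 1)

-- the helper ok(ordered): scan consecutive pairs (zip(ordered, ordered[1:])) with early return
def pvOk (edges : PySem.Set ((Int × Int) × (Int × Int))) : List (Int × Int) → Bool
  | p :: q :: rest =>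
      if pvDist1 p q && !(PySem.Set.contains edges (pvFz p q)) then false
      else pvOk edges (q :: rest)
  | _ => true

def validate_cycle_alt (sequence : List (Int × Int)) : Bool :=
  let edges := pvEdgesB sequence
  let tiles := PySem.Set.ofList sequence
  pvOk edges (PySem.List.sorted2 tiles (fun t => t.1) (fun t => t.2) false) &&
  pvOk edges (PySem.List.sorted2 tiles (fun t => t.2) (fun t => t.1) false)

-- ===== PRECONDITION & SPEC =====
def Spec_validate_cycle (sequence : List (Int × Int)) (out : Bool) : Prop := out = validate_cycle_alt sequence
instance (sequence : List (Int × Int)) (out : Bool) : Decidable (Spec_validate_cycle sequence out) := by unfold Spec_validate_cycle; infer_instance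

-- ===== CLAIM (what is proved, stated in full; the proofs are below) =====
def Claim_equal_validate_cycle : Prop := ∀ (sequence : List (Int × Int)), Dom_validate_cycle sequence → Spec_validate_cycle sequence (validate_cycle sequence)

-- ===== LEMMAS AND PROOFS =====

-- ---- frozenset representation ----
theorem pvFz_eq_iff (u v a b : Int × Int) :
    pvFz u v = pvFz a b ↔ (u = a ∧ v = b) ∨ (u = b ∧ v = a) := by
  obtain ⟨u1, u2⟩ := u; obtain ⟨v1, v2⟩ := v
  obtain ⟨a1, a2⟩ := a; obtain ⟨b1, b2⟩ := b
  simp only [pvFz, Prod.mk.injEq]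
  split_ifs <;> simp only [Prod.mk.injEq] <;> constructor <;> intro h <;> omega

theorem pvFz_comm (u v : Int × Int) : pvFz u v = pvFz v u := by
  rw [pvFz_eq_iff]; right; exact ⟨rfl, rfl⟩

theorem pvEdgesB_eq (sequence : List (Int × Int)) : pvEdgesB sequence = pvNeighbours sequence := rfl

-- ---- A's loop characterised ----
theorem pvLoopA_eq_true_iff (tiles : PySem.Set (Int × Int))
    (neighbours : PySem.Set ((Int × Int) × (Int × Int))) (l : List (Int × Int)) :
    pvLoopA tiles neighbours l = true ↔
      ∀ t ∈ l, ∀ o ∈ pvNeighs t.1 t.2,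
        PySem.Set.contains tiles o = true →
          PySem.Set.contains neighbours (pvFz o t) = true := by
  induction l with
  | nil => simp [pvLoopA]
  | cons x xs ih =>
      simp only [pvLoopA, List.mem_cons]
      split_ifs with h
      · simp only [List.any_eq_true, Bool.and_eq_true, Bool.not_eq_true'] at h
        obtain ⟨o, ho, hc, hn⟩ := h
        constructor
        · intro hfalse; exact absurd hfalse (by simp)
        · intro hall
          have := hall x (Or.inl rfl) o ho hc
          rw [this] at hn; exact absurd hn (by simp)
      · simp only [List.any_eq_true, Bool.and_eq_true, Bool.not_eq_true'] at h
        push Not at h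
        rw [ih]
        constructor
        · intro hall t ht o ho hc
          rcases ht with rfl | ht
          · have := h o ho hc
            revert this
            cases PySem.Set.contains neighbours (pvFz o t) <;> simp
          · exact hall t ht o ho hc
        · intro hall t ht o ho hc
          exact hall t (Or.inr ht) o ho hc

-- grid adjacency as a Prop, and the neighbour list characterised by it
def pvAdj (p q : Int × Int) : Prop := (p.1 - q.1).natAbs + (p.2 - q.2).natAbs = 1

theorem mem_pvNeighs (x y : Int) (o : Int × Int) :
    o ∈ pvNeighs x y ↔ pvAdj (x, y) o := by
  obtain ⟨o1, o2⟩ := o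
  simp only [pvNeighs, pvAdj, List.mem_cons, List.not_mem_nil, or_false, Prod.mk.injEq]
  omega

theorem pvAdj_comm (p q : Int × Int) : pvAdj p q ↔ pvAdj q p := by
  unfold pvAdj; omega

-- ---- sortedness of sorted2 (strict lexicographic pairwise order) ----
def pvBef {α : Type} (k1 k2 : α → Int) (a b : α) : Bool :=
  decide (k1 a < k1 b) || (!decide (k1 b < k1 a) && decide (k2 a < k2 b))

def pvLex {α : Type} (k1 k2 : α → Int) (a b : α) : Prop :=
  k1 a < k1 b ∨ (k1 a = k1 b ∧ k2 a < k2 b)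

theorem pvLex_of_bef {α : Type} (k1 k2 : α → Int) {a b : α}
    (h : pvBef k1 k2 a b = true) : pvLex k1 k2 a b := by
  simp only [pvBef, Bool.or_eq_true, Bool.and_eq_true, Bool.not_eq_true', decide_eq_true_eq,
    decide_eq_false_iff_not] at h
  unfold pvLex; omega

theorem pvLex_of_not_bef {α : Type} (k1 k2 : α → Int)
    (hinj : ∀ a b : α, k1 a = k1 b → k2 a = k2 b → a = b) {a b : α}
    (h : ¬ pvBef k1 k2 a b = true) (hne : a ≠ b) : pvLex k1 k2 b a := by
  simp only [pvBef, Bool.or_eq_true, Bool.and_eq_true, Bool.not_eq_true', decide_eq_true_eq,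
    decide_eq_false_iff_not] at h
  unfold pvLex
  by_cases h1 : k1 a = k1 b
  · by_cases h2 : k2 a = k2 b
    · exact absurd (hinj a b h1 h2) hne
    · omega
  · omega

theorem pvLex_trans {α : Type} (k1 k2 : α → Int) {a b c : α}
    (h1 : pvLex k1 k2 a b) (h2 : pvLex k1 k2 b c) : pvLex k1 k2 a c := by
  unfold pvLex at *; omega

theorem pvLex_asymm {α : Type} (k1 k2 : α → Int) {a b : α}
    (h1 : pvLex k1 k2 a b) (h2 : pvLex k1 k2 b a) : False := by
  unfold pvLex at *; omega

theorem insertBy_pairwise {α : Type} (k1 k2 : α → Int)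
    (hinj : ∀ a b : α, k1 a = k1 b → k2 a = k2 b → a = b)
    (x : α) (L : List α) (hL : L.Pairwise (pvLex k1 k2)) (hx : x ∉ L) :
    (PySem.List.insertBy (pvBef k1 k2) x L).Pairwise (pvLex k1 k2) := by
  induction L with
  | nil => simp [PySem.List.insertBy]
  | cons y ys ih =>
      rw [List.pairwise_cons] at hL
      obtain ⟨hy, hys⟩ := hL
      simp only [List.mem_cons] at hx
      push Not at hx
      obtain ⟨hxy, hxys⟩ := hx
      by_cases hb : pvBef k1 k2 x y = true
      · simp only [PySem.List.insertBy, hb, if_pos]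
        rw [List.pairwise_cons]
        refine ⟨?_, List.Pairwise.cons hy hys⟩
        intro z hz
        rcases List.mem_cons.mp hz with rfl | hz
        · exact pvLex_of_bef k1 k2 hb
        · exact pvLex_trans k1 k2 (pvLex_of_bef k1 k2 hb) (hy z hz)
      · simp only [PySem.List.insertBy, hb, if_neg, Bool.false_eq_true, not_false_iff]
        rw [List.pairwise_cons]
        refine ⟨?_, ih hys hxys⟩
        intro z hz
        rcases (PySem.List.mem_insertBy _ _ _ _).mp hz with rfl | hz
        · exact pvLex_of_not_bef k1 k2 hinj hb (fun h => hxy h)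
        · exact hy z hz

theorem foldl_insertBy_pairwise {α : Type} (k1 k2 : α → Int)
    (hinj : ∀ a b : α, k1 a = k1 b → k2 a = k2 b → a = b) :
    ∀ (xs acc : List α), xs.Nodup → acc.Pairwise (pvLex k1 k2) → (∀ y ∈ xs, y ∉ acc) →
    (xs.foldl (fun acc x => PySem.List.insertBy (pvBef k1 k2) x acc) acc).Pairwise (pvLex k1 k2) := by
  intro xs
  induction xs with
  | nil => intro acc _ hacc _; simpa using hacc
  | cons x xs ih =>
      intro acc hnd hacc hfresh
      rw [List.nodup_cons] at hnd
      simp only [List.foldl_cons]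
      refine ih _ hnd.2 (insertBy_pairwise k1 k2 hinj x acc hacc (hfresh x (List.mem_cons_self ..))) ?_
      intro y hy hmem
      rcases (PySem.List.mem_insertBy _ _ _ _).mp hmem with rfl | hmem
      · exact hnd.1 hy
      · exact hfresh y (List.mem_cons_of_mem _ hy) hmem

theorem sorted2_pairwise {α : Type} (k1 k2 : α → Int)
    (hinj : ∀ a b : α, k1 a = k1 b → k2 a = k2 b → a = b)
    (xs : List α) (hnd : xs.Nodup) :
    (PySem.List.sorted2 xs k1 k2 false).Pairwise (pvLex k1 k2) := by
  have h : PySem.List.sorted2 xs k1 k2 false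
      = xs.foldl (fun acc x => PySem.List.insertBy (pvBef k1 k2) x acc) [] := rfl
  rw [h]
  exact foldl_insertBy_pairwise k1 k2 hinj xs [] hnd (by simp) (by simp)

-- ---- B's scan characterised ----
theorem pvOk_eq_true_iff (edges : PySem.Set ((Int × Int) × (Int × Int))) :
    ∀ (L : List (Int × Int)),
      pvOk edges L = true ↔
        ∀ pq ∈ L.zip L.tail, pvDist1 pq.1 pq.2 = true →
          PySem.Set.contains edges (pvFz pq.1 pq.2) = true
  | [] => by simp [pvOk]
  | [p] => by simp [pvOk]
  | p :: q :: rest => by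
      have ih := pvOk_eq_true_iff edges (q :: rest)
      simp only [pvOk, List.tail_cons, List.zip_cons_cons, List.mem_cons]
      split_ifs with h
      · simp only [Bool.and_eq_true, Bool.not_eq_true'] at h
        constructor
        · intro hfalse; exact absurd hfalse (by simp)
        · intro hall
          have := hall (p, q) (Or.inl rfl) h.1
          rw [this] at h; exact absurd h.2 (by simp)
      · rw [ih]
        constructor
        · intro hall pq hpq hd
          rcases hpq with rfl | hpq
          · simp only [Bool.and_eq_true, Bool.not_eq_true'] at h
            push Not at h
            have := h hd
            revert this
            cases PySem.Set.contains edges (pvFz p q) <;> simp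
          · exact hall pq hpq hd
        · intro hall pq hpq hd
          exact hall pq (Or.inr hpq) hd

-- in a strictly pvLex-sorted list, a pair with nothing strictly between is consecutive
theorem mem_zip_of_between {α : Type} (R : α → α → Prop)
    (hasymm : ∀ a b, R a b → R b a → False) :
    ∀ (L : List α), L.Pairwise R → ∀ p q : α, p ∈ L → q ∈ L → R p q →
      (∀ b ∈ L, ¬ (R p b ∧ R b q)) → (p, q) ∈ L.zip L.tail := by
  intro L
  induction L with
  | nil => intro _ p q hp _ _ _; exact absurd hp (List.not_mem_nil)
  | cons a L ih =>
      intro hPW p q hp hq hpq hno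
      rw [List.pairwise_cons] at hPW
      obtain ⟨ha, hL⟩ := hPW
      rcases List.mem_cons.mp hp with rfl | hp
      · -- p = a : q is in L, and must be its head
        have hq' : q ∈ L := by
          rcases List.mem_cons.mp hq with rfl | hq'
          · exact absurd hpq (fun h => hasymm _ _ h h)
          · exact hq'
        cases L with
        | nil => exact absurd hq' (List.not_mem_nil)
        | cons b rest =>
            rcases List.mem_cons.mp hq' with rfl | hq''
            · simp [List.zip_cons_cons]
            · exact absurd ⟨ha b (List.mem_cons_self ..), (List.pairwise_cons.mp hL).1 q hq''⟩
                (hno b (List.mem_cons_of_mem _ (List.mem_cons_self ..)))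
      · -- p ∈ L : q is in L too, recurse
        have hq' : q ∈ L := by
          rcases List.mem_cons.mp hq with h | h
          · exact absurd hpq (fun hpq' => hasymm p q hpq' (h ▸ ha p hp))
          · exact h
        have hmem := ih hL p q hp hq' hpq (fun b hb => hno b (List.mem_cons_of_mem _ hb))
        cases L with
        | nil => exact absurd hp (List.not_mem_nil)
        | cons b rest =>
            simp only [List.tail_cons, List.zip_cons_cons, List.mem_cons] at hmem ⊢
            exact Or.inr hmem

theorem mem_of_mem_zip_tail {α : Type} (L : List α) (p q : α)
    (h : (p, q) ∈ L.zip L.tail) : p ∈ L ∧ q ∈ L := by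
  have h2 := List.of_mem_zip h
  exact ⟨h2.1, List.mem_of_mem_tail h2.2⟩

-- ---- the common characterisation and the equivalence ----
theorem validate_cycle_eq (sequence : List (Int × Int)) :
    validate_cycle sequence = validate_cycle_alt sequence := by
  have hinj1 : ∀ a b : Int × Int, a.1 = b.1 → a.2 = b.2 → a = b := fun a b h1 h2 => Prod.ext h1 h2
  have hinj2 : ∀ a b : Int × Int, a.2 = b.2 → a.1 = b.1 → a = b := fun a b h1 h2 => Prod.ext h2 h1
  set L1 := PySem.List.sorted2 (PySem.Set.ofList sequence) (fun t : Int × Int => t.1) (fun t => t.2) false with hL1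
  set L2 := PySem.List.sorted2 (PySem.Set.ofList sequence) (fun t : Int × Int => t.2) (fun t => t.1) false with hL2
  have hmem1 : ∀ p : Int × Int, p ∈ L1 ↔ p ∈ sequence := fun p =>
    ((PySem.List.sorted2_perm _ _ _ _).mem_iff).trans (PySem.Set.mem_ofList _ _)
  have hmem2 : ∀ p : Int × Int, p ∈ L2 ↔ p ∈ sequence := fun p =>
    ((PySem.List.sorted2_perm _ _ _ _).mem_iff).trans (PySem.Set.mem_ofList _ _)
  have hPW1 : L1.Pairwise (pvLex (fun t : Int × Int => t.1) (fun t => t.2)) :=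
    sorted2_pairwise _ _ hinj1 _ (PySem.Set.nodup_ofList _)
  have hPW2 : L2.Pairwise (pvLex (fun t : Int × Int => t.2) (fun t => t.1)) :=
    sorted2_pairwise _ _ hinj2 _ (PySem.Set.nodup_ofList _)
  rw [Bool.eq_iff_iff]
  unfold validate_cycle validate_cycle_alt
  rw [pvLoopA_eq_true_iff, Bool.and_eq_true, ← hL1, ← hL2, pvEdgesB_eq,
      pvOk_eq_true_iff, pvOk_eq_true_iff]
  -- both sides ↔ P : every grid-adjacent pair of tiles is a cycle edge
  have hA : (∀ t ∈ sequence, ∀ o ∈ pvNeighs t.1 t.2,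
        PySem.Set.contains (PySem.Set.ofList sequence) o = true →
          PySem.Set.contains (pvNeighbours sequence) (pvFz o t) = true) ↔
      (∀ p ∈ sequence, ∀ q ∈ sequence, pvAdj p q →
          PySem.Set.contains (pvNeighbours sequence) (pvFz p q) = true) := by
    constructor
    · intro h p hp q hq hadj
      have hq' : q ∈ pvNeighs p.1 p.2 := (mem_pvNeighs p.1 p.2 q).mpr (by simpa using hadj)
      have := h p hp q hq' (by rw [PySem.Set.contains_iff, PySem.Set.mem_ofList]; exact hq)
      rwa [pvFz_comm] at this
    · intro h t ht o ho hc
      have hadj : pvAdj t o := by simpa using (mem_pvNeighs t.1 t.2 o).mp ho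
      have ho' : o ∈ sequence := by
        rw [PySem.Set.contains_iff, PySem.Set.mem_ofList] at hc; exact hc
      have := h o ho' t ht ((pvAdj_comm t o).mp hadj)
      exact this
  rw [hA]
  constructor
  · -- P → both scans succeed
    intro hP
    constructor <;> intro pq hpq hd
    · obtain ⟨hp, hq⟩ := mem_of_mem_zip_tail L1 pq.1 pq.2 hpq
      exact hP pq.1 ((hmem1 _).mp hp) pq.2 ((hmem1 _).mp hq) (by simpa [pvDist1, pvAdj] using hd)
    · obtain ⟨hp, hq⟩ := mem_of_mem_zip_tail L2 pq.1 pq.2 hpq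
      exact hP pq.1 ((hmem2 _).mp hp) pq.2 ((hmem2 _).mp hq) (by simpa [pvDist1, pvAdj] using hd)
  · -- both scans succeed → P
    rintro ⟨hS1, hS2⟩ p hp q hq hadj
    -- orient the pair: it is enough to handle q strictly above or strictly right of p
    have key : ∀ p q : Int × Int, p ∈ sequence → q ∈ sequence →
        ((q.1 = p.1 ∧ q.2 = p.2 + 1) ∨ (q.1 = p.1 + 1 ∧ q.2 = p.2)) →
        PySem.Set.contains (pvNeighbours sequence) (pvFz p q) = true := by
      intro p q hp hq hor
      have hd : pvDist1 p q = true := by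
        simp only [pvDist1, beq_iff_eq]; omega
      rcases hor with ⟨h1, h2⟩ | ⟨h1, h2⟩
      · -- vertical: consecutive in L1
        have hlex : pvLex (fun t : Int × Int => t.1) (fun t => t.2) p q := by
          unfold pvLex; dsimp only; omega
        have hno : ∀ b ∈ L1, ¬ (pvLex (fun t : Int × Int => t.1) (fun t => t.2) p b ∧
            pvLex (fun t : Int × Int => t.1) (fun t => t.2) b q) := by
          intro b _ ⟨hb1, hb2⟩
          unfold pvLex at hb1 hb2; dsimp only at hb1 hb2; omega
        have hz := mem_zip_of_between _ (fun a b => pvLex_asymm _ _) L1 hPW1 p q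
          ((hmem1 p).mpr hp) ((hmem1 q).mpr hq) hlex hno
        exact hS1 (p, q) hz hd
      · -- horizontal: consecutive in L2
        have hlex : pvLex (fun t : Int × Int => t.2) (fun t => t.1) p q := by
          unfold pvLex; dsimp only; omega
        have hno : ∀ b ∈ L2, ¬ (pvLex (fun t : Int × Int => t.2) (fun t => t.1) p b ∧
            pvLex (fun t : Int × Int => t.2) (fun t => t.1) b q) := by
          intro b _ ⟨hb1, hb2⟩
          unfold pvLex at hb1 hb2; dsimp only at hb1 hb2; omega
        have hz := mem_zip_of_between _ (fun a b => pvLex_asymm _ _) L2 hPW2 p q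
          ((hmem2 p).mpr hp) ((hmem2 q).mpr hq) hlex hno
        exact hS2 (p, q) hz hd
    unfold pvAdj at hadj
    rcases (by omega : (q.1 = p.1 ∧ q.2 = p.2 + 1) ∨ (q.1 = p.1 + 1 ∧ q.2 = p.2)
        ∨ (p.1 = q.1 ∧ p.2 = q.2 + 1) ∨ (p.1 = q.1 + 1 ∧ p.2 = q.2)) with h | h | h | h
    · exact key p q hp hq (Or.inl h)
    · exact key p q hp hq (Or.inr h)
    · rw [pvFz_comm]; exact key q p hq hp (Or.inl h)
    · rw [pvFz_comm]; exact key q p hq hp (Or.inr h)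

-- ===== VERDICT (by name: the statement is the Claim_ definition above) =====
theorem validate_cycle_spec : Claim_equal_validate_cycle := by
  intro sequence _
  unfold Spec_validate_cycle
  exact validate_cycle_eq sequence
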